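-- pv_equiv track=rewrite | github.com/ramphias/universal-ontology-definition | scripts/visualize_ontology.py | assign_domains
-- ===== SOURCE A (Python) =====
-- L1_DOMAIN_ROOTS = {
--     "Entity": "entity", "Party": "entity", "Person": "entity",
--     "Organization": "entity", "OrgUnit": "entity",
--     "Resource": "resource", "ProductService": "resource", "Asset": "resource",
--     "DataObject": "resource", "Document": "resource", "SystemApplication": "resource",
--     "Governance": "governance", "Policy": "governance", "Rule": "governance",
--     "Control": "governance", "Risk": "governance",
--     "Operational": "operational", "Role": "operational", "Capability": "operational",
--     "Process": "operational", "Event": "operational",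
--     "Measurement": "measurement", "Goal": "measurement", "KPI": "measurement",
-- }
--
-- def assign_domains(classes):
--     parent_map = {c["id"]: c.get("parent") for c in classes}
--     cache = dict(L1_DOMAIN_ROOTS)
--
--     def resolve(cid, seen=None):
--         if cid in cache:
--             return cache[cid]
--         if seen and cid in seen:
--             cache[cid] = "unknown"
--             return "unknown"
--         seen = (seen or set()) | {cid}
--         parent = parent_map.get(cid)
--         d = resolve(parent, seen) if parent else "unknown"
--         cache[cid] = d
--         return d
--
--     for c in classes:
--         c["domain"] = resolve(c["id"])
--     return classes
-- ===== SOURCE B (Python) =====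
-- L1_DOMAIN_ROOTS = {
--     "Entity": "entity", "Party": "entity", "Person": "entity",
--     "Organization": "entity", "OrgUnit": "entity",
--     "Resource": "resource", "ProductService": "resource", "Asset": "resource",
--     "DataObject": "resource", "Document": "resource", "SystemApplication": "resource",
--     "Governance": "governance", "Policy": "governance", "Rule": "governance",
--     "Control": "governance", "Risk": "governance",
--     "Operational": "operational", "Role": "operational", "Capability": "operational",
--     "Process": "operational", "Event": "operational",
--     "Measurement": "measurement", "Goal": "measurement", "KPI": "measurement",
-- }
--
-- def assign_domains(classes):
--     parent_map = {c["id"]: c.get("parent") for c in classes}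
--     cache = dict(L1_DOMAIN_ROOTS)
--     for c in classes:
--         n = c["id"]
--         path = []
--         while True:
--             if n in cache:
--                 result = cache[n]
--                 break
--             if n in path:
--                 result = "unknown"
--                 break
--             path.append(n)
--             parent = parent_map.get(n)
--             if not parent:
--                 result = "unknown"
--                 break
--             n = parent
--         for m in reversed(path):
--             cache[m] = result
--         c["domain"] = result
--     return classes
-- ===== Notes on version B (the rewrite author's own statement) =====
-- stated objective: alternative
-- what changed: Replaces the recursive memoized resolver (per-call copied 'seen' sets, cache written on recursion unwind) by an explicit iterative parent-chain walk that accumulates the path in a list and writes the cache back in one pass after the walk.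
import Mathlib
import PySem

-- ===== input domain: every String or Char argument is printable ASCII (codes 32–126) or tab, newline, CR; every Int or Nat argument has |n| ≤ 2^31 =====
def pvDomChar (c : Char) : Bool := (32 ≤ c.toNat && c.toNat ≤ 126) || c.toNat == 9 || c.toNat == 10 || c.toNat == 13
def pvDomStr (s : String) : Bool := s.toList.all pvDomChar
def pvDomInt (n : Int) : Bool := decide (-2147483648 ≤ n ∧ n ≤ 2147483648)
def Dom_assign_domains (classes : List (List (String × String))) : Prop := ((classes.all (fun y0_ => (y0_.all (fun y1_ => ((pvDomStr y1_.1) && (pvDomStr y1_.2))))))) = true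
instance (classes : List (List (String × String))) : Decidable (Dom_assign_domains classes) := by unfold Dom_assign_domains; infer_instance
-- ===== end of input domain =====

-- B replaces A's recursive memoized resolver by an iterative parent-chain walk with an explicit
-- path list and a single cache write-back pass; same return value (the Python versions also mutate
-- the class dicts in place identically — the theorems here are about the returned value).


-- ===== PORT A =====

-- the module constant L1_DOMAIN_ROOTS (used by both versions)
def pvRoots : PySem.Dict String String := PySem.Dict.ofList [
  ("Entity", "entity"), ("Party", "entity"), ("Person", "entity"),
  ("Organization", "entity"), ("OrgUnit", "entity"),
  ("Resource", "resource"), ("ProductService", "resource"), ("Asset", "resource"),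
  ("DataObject", "resource"), ("Document", "resource"), ("SystemApplication", "resource"),
  ("Governance", "governance"), ("Policy", "governance"), ("Rule", "governance"),
  ("Control", "governance"), ("Risk", "governance"),
  ("Operational", "operational"), ("Role", "operational"), ("Capability", "operational"),
  ("Process", "operational"), ("Event", "operational"),
  ("Measurement", "measurement"), ("Goal", "measurement"), ("KPI", "measurement")]

-- parent_map = {c["id"]: c.get("parent") for c in classes}   (identical line in A and B;
-- c["id"] raises KeyError when absent — excluded by Pre_; the port reads a "" default there)
def pvParentMap (classes : List (List (String × String))) : PySem.Dict String (Option String) :=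
  classes.foldl (fun d c =>
    let dc := PySem.Dict.ofList c
    d.insert (dc.getD "id" "") (dc.get? "parent")) PySem.Dict.empty

-- number of parent_map keys not yet visited: the termination measure of both walks
def pvMu (pm : PySem.Dict String (Option String)) (visited : List String) : Nat :=
  ((PySem.Dict.keys pm).filter (fun k => !visited.contains k)).length

-- helper for the decreasing_by proofs of both ports (cited by name there)
theorem pvMu_lt (pm : PySem.Dict String (Option String)) (visited : List String) (cid : String)
    (hk : pm.getD cid none ≠ none) (hv : cid ∉ visited) :
    pvMu pm (visited ++ [cid]) < pvMu pm visited := by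
  have hmem : cid ∈ PySem.Dict.keys pm := by
    by_contra hc
    have : pm.get? cid = none := (PySem.Dict.get?_eq_none_iff_not_mem_keys pm cid).mpr hc
    simp [PySem.Dict.getD_eq_get?_getD, this] at hk
  unfold pvMu
  have hsub : List.Sublist ((PySem.Dict.keys pm).filter (fun k => !(visited ++ [cid]).contains k))
      ((PySem.Dict.keys pm).filter (fun k => !visited.contains k)) := by
    apply List.monotone_filter_right
    intro k h
    simp only [Bool.not_eq_eq_eq_not, Bool.not_true, List.contains_eq_mem, decide_eq_false_iff_not,
      List.mem_append, List.mem_singleton] at h ⊢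
    exact fun hm => h (Or.inl hm)
  have h1 : cid ∈ (PySem.Dict.keys pm).filter (fun k => !visited.contains k) := by
    simp [List.mem_filter, hmem, List.contains_eq_mem, hv]
  have h2 : cid ∉ (PySem.Dict.keys pm).filter (fun k => !(visited ++ [cid]).contains k) := by
    simp [List.mem_filter]
  rcases hsub.length_le.lt_or_eq with hlt | heq
  · exact hlt
  · exact absurd (hsub.eq_of_length heq ▸ h1) h2

-- def resolve(cid, seen=None): … (the inner recursive memoized resolver of A)
def pvResolveA (pm : PySem.Dict String (Option String)) (cache : PySem.Dict String String)
    (cid : String) (seen : Option (List String)) : String × PySem.Dict String String :=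
  match cache.get? cid with
  | some d => (d, cache)                                   -- if cid in cache: return cache[cid]
  | none =>
    if (match seen with | some s => !s.isEmpty && PySem.Set.contains s cid | none => false) then
      ("unknown", cache.insert cid "unknown")              -- if seen and cid in seen
    else
      let seen' := PySem.Set.union (seen.getD PySem.Set.empty) [cid]   -- seen = (seen or set()) | {cid}
      match hp : pm.getD cid none with                     -- parent = parent_map.get(cid)
      | some p =>
        if hpe : p = "" then ("unknown", cache.insert cid "unknown")   -- falsy parent
        else
          let r := pvResolveA pm cache p (some seen')      -- d = resolve(parent, seen)
          (r.1, r.2.insert cid r.1)                        -- cache[cid] = d; return d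
      | none => ("unknown", cache.insert cid "unknown")    -- parent is None
termination_by pvMu pm (seen.getD [])
decreasing_by
  rename_i hseen
  simp only [Option.getD_some]
  have hnot : cid ∉ seen.getD [] := by
    match seen with
    | none => simp
    | some s =>
      simp only [Option.getD_some]
      intro hmem
      have hne : s ≠ [] := by rintro rfl; simp at hmem
      simp [List.isEmpty_iff, hne] at hseen
      exact hseen hmem
  have : PySem.Set.union (seen.getD PySem.Set.empty) [cid] = seen.getD [] ++ [cid] := by
    show PySem.Set.union (seen.getD []) [cid] = seen.getD [] ++ [cid]
    simp [PySem.Set.union, PySem.Set.update, PySem.Set.add_of_not_mem hnot]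
  rw [this]
  exact pvMu_lt pm (seen.getD []) cid (by simp [hp]) hnot

-- for c in classes: c["domain"] = resolve(c["id"])   (mutating cache); return classes
def assign_domains (classes : List (List (String × String))) : List (List (String × String)) :=
  let pm := pvParentMap classes
  (classes.foldl (fun st c =>
    let dc := PySem.Dict.ofList c
    let r := pvResolveA pm st.1 (dc.getD "id" "") none
    (r.2, st.2 ++ [(dc.insert "domain" r.1).items])) (pvRoots, [])).2

-- ===== PORT B =====

-- the inner while-loop of B: walk the parent chain, accumulating the path; returns (result, path)
def pvWalkB (pm : PySem.Dict String (Option String)) (cache : PySem.Dict String String)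
    (n : String) (path : List String) : String × List String :=
  match cache.get? n with
  | some d => (d, path)                                    -- if n in cache: result = cache[n]
  | none =>
    if path.contains n then ("unknown", path)              -- if n in path: cycle
    else
      let path' := path ++ [n]                             -- path.append(n)
      match hp : pm.getD n none with                       -- parent = parent_map.get(n)
      | some p =>
        if hpe : p = "" then ("unknown", path')            -- if not parent
        else pvWalkB pm cache p path'                      -- n = parent; continue
      | none => ("unknown", path')
termination_by pvMu pm path
decreasing_by
  rename_i hcyc
  exact pvMu_lt pm path n (by simp [hp]) (by simpa using hcyc)

def assign_domains_alt (classes : List (List (String × String))) : List (List (String × String)) :=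
  let pm := pvParentMap classes
  (classes.foldl (fun st c =>
    let dc := PySem.Dict.ofList c
    let w := pvWalkB pm st.1 (dc.getD "id" "") []
    -- for m in reversed(path): cache[m] = result
    let cache' := w.2.reverse.foldl (fun cc m => cc.insert m w.1) st.1
    (cache', st.2 ++ [(dc.insert "domain" w.1).items])) (pvRoots, [])).2

-- ===== PRECONDITION & SPEC =====
-- Pre_ excludes exactly the inputs on which the Python A raises KeyError: a class dict without an "id" key.
def Pre_assign_domains (classes : List (List (String × String))) : Prop :=
  ∀ c ∈ classes, "id" ∈ c.map (·.1)
instance (classes : List (List (String × String))) : Decidable (Pre_assign_domains classes) := by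
  unfold Pre_assign_domains; infer_instance

def pvWitness_assign_domains : (List (List (String × String))) :=
  [[("id", "X"), ("parent", "Entity")], [("id", "Y"), ("parent", "X")]]

def Spec_assign_domains (classes : List (List (String × String))) (out : List (List (String × String))) : Prop := out = assign_domains_alt classes
instance (classes : List (List (String × String))) (out : List (List (String × String))) : Decidable (Spec_assign_domains classes out) := by unfold Spec_assign_domains; infer_instance

-- ===== CLAIM (what is proved, stated in full; the proofs are below) =====
def Claim_equal_assign_domains : Prop := ∀ (classes : List (List (String × String))), Dom_assign_domains classes → Pre_assign_domains classes → Spec_assign_domains classes (assign_domains classes)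

-- ===== LEMMAS AND PROOFS =====

-- A's 'seen' argument as a function of B's path: None at the top call, the path afterwards
def pvOptPath (path : List String) : Option (List String) :=
  if path.isEmpty then none else some path

theorem pvWriteback_get? (r : String) (l : List String) (c : PySem.Dict String String)
    (k : String) :
    (l.foldl (fun cc m => cc.insert m r) c).get? k = if k ∈ l then some r else c.get? k := by
  induction l generalizing c with
  | nil => simp
  | cons x xs ih =>
    simp only [List.foldl_cons, ih, List.mem_cons, PySem.Dict.get?_insert]
    split_ifs <;> simp_all

-- the simulation: A's recursive resolve against B's iterative walk, over get?-equal caches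
theorem pvSim (pm : PySem.Dict String (Option String)) :
    ∀ (n : Nat) (path : List String) (cid : String) (cA cB : PySem.Dict String String),
      pvMu pm path ≤ n →
      (∀ k, cA.get? k = cB.get? k) →
      (pvResolveA pm cA cid (pvOptPath path)).1 = (pvWalkB pm cB cid path).1 ∧
      (∃ new, (pvWalkB pm cB cid path).2 = path ++ new) ∧
      (∀ k, k ∉ path →
        (pvResolveA pm cA cid (pvOptPath path)).2.get? k =
          if k ∈ (pvWalkB pm cB cid path).2.drop path.length
          then some ((pvWalkB pm cB cid path).1) else cA.get? k) := by
  intro n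
  induction n using Nat.strong_induction_on with
  | _ n ih =>
  intro path cid cA cB hmu hext
  have hB : cB.get? cid = cA.get? cid := (hext cid).symm
  rw [pvResolveA.eq_def, pvWalkB.eq_def]
  have htest : (match pvOptPath path with
      | some s => !s.isEmpty && PySem.Set.contains s cid | none => false) = path.contains cid := by
    by_cases hp : path.isEmpty
    · rw [List.isEmpty_iff.mp hp]; simp [pvOptPath]
    · simp [pvOptPath, hp]
  cases hg : cA.get? cid with
  | some d =>
    rw [hg] at hB
    simp only [hg, hB]
    refine ⟨?_, ⟨[], by simp⟩, fun k _ => by simp [List.drop_length]⟩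
    simp
  | none =>
    rw [hg] at hB
    simp only [hg, hB, htest]
    by_cases hcyc : path.contains cid
    · have hmem : cid ∈ path := by simpa using hcyc
      simp only [hcyc, if_true]
      refine ⟨?_, ⟨[], by simp⟩, fun k hk => ?_⟩
      · simp
      have hkcid : k ≠ cid := fun h => hk (h ▸ hmem)
      simp [PySem.Dict.get?_insert, hkcid, List.drop_length]
    · have hnot : cid ∉ path := by simpa using hcyc
      simp only [hcyc, Bool.false_eq_true, if_false]
      have hseen' : PySem.Set.union ((pvOptPath path).getD PySem.Set.empty) [cid]
          = path ++ [cid] := by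
        have hgd : (pvOptPath path).getD PySem.Set.empty = path := by
          by_cases hp : path.isEmpty
          · rw [List.isEmpty_iff.mp hp]; rfl
          · simp [pvOptPath, hp]
        rw [hgd]
        simp [PySem.Set.union, PySem.Set.update, PySem.Set.add_of_not_mem hnot]
      cases hpm : pm.getD cid none with
      | none =>
        refine ⟨?_, ⟨[cid], rfl⟩, fun k hk => ?_⟩
        · simp
        rw [List.drop_left]
        by_cases hkcid : k = cid
        · subst hkcid; simp [PySem.Dict.get?_insert_self]
        · simp [PySem.Dict.get?_insert, hkcid]
      | some p =>
        by_cases hpe : p = ""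
        · subst hpe
          simp only [dite_eq_ite, reduceIte]
          refine ⟨?_, ⟨[cid], rfl⟩, fun k hk => ?_⟩
          · simp
          rw [List.drop_left]
          by_cases hkcid : k = cid
          · subst hkcid; simp [PySem.Dict.get?_insert_self]
          · simp [PySem.Dict.get?_insert, hkcid]
        · simp only [dif_neg hpe, if_neg hpe]
          have hlt : pvMu pm (path ++ [cid]) < n :=
            Nat.lt_of_lt_of_le (pvMu_lt pm path cid (by simp [hpm]) hnot) hmu
          have hrec := ih (pvMu pm (path ++ [cid])) hlt (path ++ [cid]) p cA cB le_rfl hext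
          have hopt : pvOptPath (path ++ [cid]) = some (path ++ [cid]) := by simp [pvOptPath]
          rw [hopt] at hrec
          rw [hseen']
          obtain ⟨H1, ⟨new, Hnew⟩, H2⟩ := hrec
          refine ⟨H1, ⟨cid :: new, by rw [Hnew]; simp⟩, fun k hk => ?_⟩
          rw [Hnew, List.append_assoc, List.drop_left, List.singleton_append]
          by_cases hkcid : k = cid
          · subst hkcid
            simp [PySem.Dict.get?_insert_self, H1]
          · have hknotp : k ∉ path ++ [cid] := by
              simp only [List.mem_append, List.mem_singleton]
              rintro (h | h); exacts [hk h, hkcid h]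
            have := H2 k hknotp
            rw [Hnew, List.drop_left] at this
            simp only [PySem.Dict.get?_insert, if_neg hkcid, this, List.mem_cons]
            simp [hkcid]

-- the outer loop over classes, carrying get?-equal caches and equal outputs
theorem pvOuter (pm : PySem.Dict String (Option String)) :
    ∀ (cs : List (List (String × String))) (cA cB : PySem.Dict String String)
      (out : List (List (String × String))),
      (∀ k, cA.get? k = cB.get? k) →
      (cs.foldl (fun st c =>
        let dc := PySem.Dict.ofList c
        let r := pvResolveA pm st.1 (dc.getD "id" "") none
        (r.2, st.2 ++ [(dc.insert "domain" r.1).items])) (cA, out)).2 =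
      (cs.foldl (fun st c =>
        let dc := PySem.Dict.ofList c
        let w := pvWalkB pm st.1 (dc.getD "id" "") []
        let cache' := w.2.reverse.foldl (fun cc m => cc.insert m w.1) st.1
        (cache', st.2 ++ [(dc.insert "domain" w.1).items])) (cB, out)).2 := by
  intro cs
  induction cs with
  | nil => intro cA cB out hext; rfl
  | cons c cs ih =>
    intro cA cB out hext
    simp only [List.foldl_cons]
    obtain ⟨h1, ⟨new, hnew⟩, h2⟩ :=
      pvSim pm (pvMu pm []) [] ((PySem.Dict.ofList c).getD "id" "") cA cB le_rfl hext
    rw [show pvOptPath [] = none from rfl] at h1 h2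
    rw [h1]
    apply ih
    intro k
    rw [h2 k (List.not_mem_nil), pvWriteback_get?]
    simp only [List.length_nil, List.drop_zero, List.mem_reverse, hext k]

-- ===== VERDICT (by name: the statement is the Claim_ definition above) =====
theorem assign_domains_spec : Claim_equal_assign_domains := by
  intro classes _ _
  show assign_domains classes = assign_domains_alt classes
  simp only [assign_domains, assign_domains_alt]
  exact pvOuter (pvParentMap classes) classes pvRoots pvRoots [] (fun _ => rfl)
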